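-- pv_equiv track=rewrite | github.com/kate21/milestones | milestone_2/BalancedParenthesis.py | count_parentheses
-- ===== SOURCE A (Python) =====
-- def count_parentheses(s):
--     open_count = 0  # Counter for opening parentheses
--     close_count = 0  # Counter for closing parentheses
--
--     for char in s:
--         if char == '(':
--             open_count += 1
--         elif char == ')':
--             close_count += 1
--         else:
--             continue
--
--     return open_count, close_count
-- ===== SOURCE B (Python) =====
-- def count_parentheses(s):
--     # Divide and conquer: counts of a string are the sums of the counts
--     # of its two halves; single characters are classified directly.
--     def go(lo, hi):
--         n = hi - lo
--         if n == 0: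
--             return (0, 0)
--         if n == 1:
--             c = s[lo]
--             if c == '(':
--                 return (1, 0)
--             if c == ')':
--                 return (0, 1)
--             return (0, 0)
--         mid = (lo + hi) // 2
--         o1, c1 = go(lo, mid)
--         o2, c2 = go(mid, hi)
--         return (o1 + o2, c1 + c2)
--     return go(0, len(s))
-- ===== Notes on version B (the rewrite author's own statement) =====
-- stated objective: alternative
-- what changed: Replaces A's single left-to-right pass with two mutable counters by a recursive divide-and-conquer: the string is split in half, each half counted recursively, and the pairs summed; correctness rests on character counts being additive over concatenation.
import Mathlib
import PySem

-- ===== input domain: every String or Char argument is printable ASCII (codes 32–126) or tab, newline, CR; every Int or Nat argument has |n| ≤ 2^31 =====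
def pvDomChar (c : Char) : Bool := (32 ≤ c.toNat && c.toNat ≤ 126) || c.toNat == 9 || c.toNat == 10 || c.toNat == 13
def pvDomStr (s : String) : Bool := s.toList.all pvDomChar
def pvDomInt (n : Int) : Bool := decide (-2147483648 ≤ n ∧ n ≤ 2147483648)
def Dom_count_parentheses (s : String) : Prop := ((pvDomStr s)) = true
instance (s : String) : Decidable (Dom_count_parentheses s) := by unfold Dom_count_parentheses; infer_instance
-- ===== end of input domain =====

-- B replaces A's single accumulator loop by divide-and-conquer on halves (alternative decomposition).

-- ===== PORT A =====
-- A: one pass, two explicit counters updated by branching on each character.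
def count_parentheses (s : String) : Int × Int :=
  s.toList.foldl
    (fun (acc : Int × Int) (c : Char) =>
      if c == '(' then (acc.1 + 1, acc.2)
      else if c == ')' then (acc.1, acc.2 + 1)
      else acc)
    (0, 0)

-- ===== PORT B =====
-- B's go(lo,hi) works on the slice s[lo:hi]; the port recurses on that slice as a list,
-- splitting at mid = length / 2 (same split point as (lo+hi)//2 - lo for nonnegative bounds).
def cpGo : List Char → Int × Int
  | [] => (0, 0)
  | [c] => if c == '(' then (1, 0) else if c == ')' then (0, 1) else (0, 0)
  | x :: y :: t =>
    let m := (x :: y :: t).length / 2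
    let p := cpGo ((x :: y :: t).take m)
    let q := cpGo ((x :: y :: t).drop m)
    (p.1 + q.1, p.2 + q.2)
termination_by l => l.length
decreasing_by
  · simp; omega
  · simp; omega

def count_parentheses_alt (s : String) : Int × Int := cpGo s.toList

-- ===== PRECONDITION & SPEC =====
def Spec_count_parentheses (s : String) (out : Int × Int) : Prop := out = count_parentheses_alt s
instance (s : String) (out : Int × Int) : Decidable (Spec_count_parentheses s out) := by unfold Spec_count_parentheses; infer_instance

-- ===== CLAIM (what is proved, stated in full; the proofs are below) =====
def Claim_equal_count_parentheses : Prop := ∀ (s : String), Dom_count_parentheses s → Spec_count_parentheses s (count_parentheses s)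

-- ===== LEMMAS AND PROOFS =====

-- A's fold computes the two character counts.
lemma foldl_pair_count (l : List Char) : ∀ (a b : Int),
    l.foldl (fun (acc : Int × Int) (c : Char) =>
      if c == '(' then (acc.1 + 1, acc.2)
      else if c == ')' then (acc.1, acc.2 + 1)
      else acc) (a, b)
    = (a + l.count '(', b + l.count ')') := by
  induction l with
  | nil => intro a b; simp
  | cons h t ih =>
    intro a b
    rw [List.foldl_cons]
    by_cases h1 : h = '('
    · subst h1
      show List.foldl _ (a + 1, b) t = _
      rw [ih (a + 1) b]
      simp [List.count_cons]; ring
    · by_cases h2 : h = ')'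
      · subst h2
        show List.foldl _ (a, b + 1) t = _
        rw [ih a (b + 1)]
        simp [List.count_cons, h1]; ring
      · have hstep : (if h == '(' then ((a, b).1 + 1, (a, b).2)
            else if h == ')' then ((a, b).1, (a, b).2 + 1) else (a, b)) = (a, b) := by
          simp [h1, h2]
        rw [hstep, ih a b]
        simp [List.count_cons, h1, h2]

-- B's divide-and-conquer computes the same two counts (counts are additive over take ++ drop).
lemma cpGo_eq_aux : ∀ (n : Nat) (l : List Char), l.length = n →
    cpGo l = ((l.count '(' : Int), (l.count ')' : Int)) := by
  intro n
  induction n using Nat.strong_induction_on with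
  | _ n ih =>
    intro l hl
    match l with
    | [] => simp [cpGo]
    | [c] =>
      by_cases h1 : c = '('
      · simp [cpGo, h1]
      · by_cases h2 : c = ')'
        · simp [cpGo, h1, h2]
        · simp [cpGo, h1, h2, List.count_cons]
    | x :: y :: t =>
      rw [cpGo]
      show ((cpGo _).1 + (cpGo _).1, (cpGo _).2 + (cpGo _).2) = _
      have hn : t.length + 2 = n := by simpa using hl
      have hm1 : ((x :: y :: t).take ((x :: y :: t).length / 2)).length < n := by
        simp; omega
      have hm2 : ((x :: y :: t).drop ((x :: y :: t).length / 2)).length < n := by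
        simp; omega
      rw [ih _ hm1 _ rfl, ih _ hm2 _ rfl]
      have hco : ((x :: y :: t).take ((x :: y :: t).length / 2)).count '('
          + ((x :: y :: t).drop ((x :: y :: t).length / 2)).count '('
          = (x :: y :: t).count '(' := by
        rw [← List.count_append, List.take_append_drop]
      have hcc : ((x :: y :: t).take ((x :: y :: t).length / 2)).count ')'
          + ((x :: y :: t).drop ((x :: y :: t).length / 2)).count ')'
          = (x :: y :: t).count ')' := by
        rw [← List.count_append, List.take_append_drop]
      simp only [Prod.mk.injEq]
      constructor <;> push_cast [← hco, ← hcc] <;> ring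

lemma cpGo_eq (l : List Char) : cpGo l = ((l.count '(' : Int), (l.count ')' : Int)) :=
  cpGo_eq_aux l.length l rfl

-- ===== VERDICT (by name: the statement is the Claim_ definition above) =====
theorem count_parentheses_spec : Claim_equal_count_parentheses := by
  intro s _
  show count_parentheses s = count_parentheses_alt s
  unfold count_parentheses count_parentheses_alt
  rw [foldl_pair_count s.toList 0 0, cpGo_eq]
  simp
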